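-- pv_equiv track=rewrite | github.com/Jurij15/SchoolPython | 4L/06102025stacknaloge/naloga3.py | ReversePolishNotation
-- ===== SOURCE A (Python) =====
-- def ReversePolishNotation(s):
--     symbols = ["+","*","-"]
--     stack = []
--     syms = []
--
--     for char in s:
--         if char in symbols:
--             syms.append(char)
--         else:
--             stack.append(char)
--     return  stack+syms
-- ===== SOURCE B (Python) =====
-- def ReversePolishNotation(s):
--     # stable sort on a boolean key: operands (False) keep order and come first,
--     # operators (True) keep order and follow -- exactly stack+syms of A.
--     return sorted(s, key=lambda c: c in ["+", "*", "-"])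
-- ===== Notes on version B (the rewrite author's own statement) =====
-- stated objective: alternative
-- what changed: Replaced the two-accumulator loop with a single stable sort on a boolean operator-membership key; stability makes the stable partition (operands first, operators last, both in original order) fall out of sorted() with no explicit loop.
import Mathlib
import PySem

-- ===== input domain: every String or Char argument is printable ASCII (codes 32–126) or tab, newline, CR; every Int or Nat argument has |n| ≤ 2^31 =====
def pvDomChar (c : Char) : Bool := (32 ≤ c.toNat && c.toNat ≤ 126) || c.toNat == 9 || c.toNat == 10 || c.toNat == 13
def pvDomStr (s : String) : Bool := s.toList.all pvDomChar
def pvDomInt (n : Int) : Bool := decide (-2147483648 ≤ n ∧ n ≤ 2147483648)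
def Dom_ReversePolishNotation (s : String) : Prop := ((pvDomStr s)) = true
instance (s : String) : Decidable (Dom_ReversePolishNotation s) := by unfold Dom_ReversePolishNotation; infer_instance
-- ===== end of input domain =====

-- B replaces A's two-accumulator loop with one stable sort on a boolean operator-membership key (alternative decomposition, not faster).

-- ===== PORT A =====
def ReversePolishNotation (s : String) : List String :=
  let symbols : List String := ["+", "*", "-"]
  let r := s.toList.foldl
    (fun (st : List String × List String) (c : Char) =>
      let char := String.mk [c]
      if char ∈ symbols then (st.1, st.2 ++ [char]) else (st.1 ++ [char], st.2))
    ([], [])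
  r.1 ++ r.2

-- ===== PORT B =====
-- sorted(s, key=lambda c: c in ["+","*","-"]): iterating a string yields 1-char strings;
-- the boolean key is ported as the Int 0/1 it compares as in Python (False < True).
def ReversePolishNotation_alt (s : String) : List String :=
  PySem.List.sorted (s.toList.map (fun c => String.mk [c]))
    (fun t => if t ∈ (["+", "*", "-"] : List String) then (1 : Int) else 0) false

-- ===== PRECONDITION & SPEC =====
def Spec_ReversePolishNotation (s : String) (out : List String) : Prop := out = ReversePolishNotation_alt s
instance (s : String) (out : List String) : Decidable (Spec_ReversePolishNotation s out) := by unfold Spec_ReversePolishNotation; infer_instance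

-- ===== CLAIM (what is proved, stated in full; the proofs are below) =====
def Claim_equal_ReversePolishNotation : Prop := ∀ (s : String), Dom_ReversePolishNotation s → Spec_ReversePolishNotation s (ReversePolishNotation s)

-- ===== LEMMAS AND PROOFS =====

def pvKey (t : String) : Int := if t ∈ (["+", "*", "-"] : List String) then (1 : Int) else 0

lemma pvKey_one_of_ne_zero (t : String) (h : pvKey t ≠ 0) : pvKey t = 1 := by
  unfold pvKey at h ⊢; split at h <;> simp_all

-- A's value, with the loop written out (the lets zeta-reduce; rfl)
lemma A_unfold (s : String) :
    ReversePolishNotation s =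
      (s.toList.foldl
        (fun (st : List String × List String) (c : Char) =>
          if String.mk [c] ∈ (["+", "*", "-"] : List String) then (st.1, st.2 ++ [String.mk [c]])
          else (st.1 ++ [String.mk [c]], st.2)) ([], [])).1
      ++ (s.toList.foldl
        (fun (st : List String × List String) (c : Char) =>
          if String.mk [c] ∈ (["+", "*", "-"] : List String) then (st.1, st.2 ++ [String.mk [c]])
          else (st.1 ++ [String.mk [c]], st.2)) ([], [])).2 := rfl

-- B's value: a stable insertion-sort fold with comparison pvKey (defeq to the port's key)
lemma B_unfold (s : String) :
    ReversePolishNotation_alt s =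
      (s.toList.map (fun c => String.mk [c])).foldl
        (fun acc x => PySem.List.insertBy (fun a b => decide (pvKey a < pvKey b)) x acc) [] :=
  PySem.List.sorted_eq_foldl_insertBy _ _

-- A's loop accumulates the non-operator / operator filters of the processed prefix.
lemma foldA (l : List Char) (a b : List String) :
    l.foldl
      (fun (st : List String × List String) (c : Char) =>
        if String.mk [c] ∈ (["+", "*", "-"] : List String) then (st.1, st.2 ++ [String.mk [c]])
        else (st.1 ++ [String.mk [c]], st.2)) (a, b)
    = (a ++ (l.map (fun c => String.mk [c])).filter (fun t => decide (pvKey t = 0)),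
       b ++ (l.map (fun c => String.mk [c])).filter (fun t => decide (pvKey t = 1))) := by
  induction l generalizing a b with
  | nil => simp
  | cons x xs ih =>
    rw [List.foldl_cons]
    by_cases hx : String.mk [x] ∈ (["+", "*", "-"] : List String)
    · have key1 : pvKey (String.mk [x]) = 1 := by simp [pvKey, hx]
      rw [if_pos hx, ih]
      simp [key1]
    · have key0 : pvKey (String.mk [x]) = 0 := by simp [pvKey, hx]
      rw [if_neg hx, ih]
      simp [key0]

-- inserting into a 0-block ++ 1-block lands exactly at the boundary (key 0) or the end (key 1)
lemma insert01 (x : String) (a0 a1 : List String)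
    (h0 : ∀ y ∈ a0, pvKey y = 0) (h1 : ∀ y ∈ a1, pvKey y = 1) :
    PySem.List.insertBy (fun a b => decide (pvKey a < pvKey b)) x (a0 ++ a1)
    = if pvKey x = 0 then a0 ++ x :: a1 else (a0 ++ a1) ++ [x] := by
  by_cases hx : pvKey x = 0
  · simp only [hx, if_true]
    induction a0 with
    | nil =>
      cases a1 with
      | nil => simp [PySem.List.insertBy]
      | cons y ys =>
        have hy := h1 y (by simp)
        simp [PySem.List.insertBy, hx, hy]
    | cons z zs ih =>
      have hz := h0 z (by simp)
      simp only [List.cons_append, PySem.List.insertBy, hx, hz]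
      norm_num
      exact ih (fun y hy => h0 y (by simp [hy]))
  · rw [if_neg hx]
    apply PySem.List.insertBy_of_forall_not_before
    intro y hy
    have hx1 : pvKey x = 1 := pvKey_one_of_ne_zero x hx
    rcases (List.mem_append.mp hy) with h | h
    · have := h0 y h; simp [this, hx1]
    · have := h1 y h; simp [this, hx1]

lemma foldB (l : List String) (a0 a1 : List String)
    (h0 : ∀ y ∈ a0, pvKey y = 0) (h1 : ∀ y ∈ a1, pvKey y = 1) :
    l.foldl (fun acc x => PySem.List.insertBy (fun a b => decide (pvKey a < pvKey b)) x acc) (a0 ++ a1)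
    = (a0 ++ l.filter (fun t => decide (pvKey t = 0))) ++ (a1 ++ l.filter (fun t => decide (pvKey t = 1))) := by
  induction l generalizing a0 a1 with
  | nil => simp
  | cons x xs ih =>
    rw [List.foldl_cons, insert01 x a0 a1 h0 h1]
    by_cases hx : pvKey x = 0
    · rw [if_pos hx]
      have hsplit : a0 ++ x :: a1 = (a0 ++ [x]) ++ a1 := by simp
      have h0' : ∀ y ∈ a0 ++ [x], pvKey y = 0 := by
        intro y hy
        rcases List.mem_append.mp hy with h | h
        · exact h0 y h
        · simp at h; simp [h, hx]
      rw [hsplit, ih (a0 ++ [x]) a1 h0' h1]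
      simp [hx]
    · have hx1 : pvKey x = 1 := pvKey_one_of_ne_zero x hx
      rw [if_neg hx]
      have hsplit : (a0 ++ a1) ++ [x] = a0 ++ (a1 ++ [x]) := by simp
      have h1' : ∀ y ∈ a1 ++ [x], pvKey y = 1 := by
        intro y hy
        rcases List.mem_append.mp hy with h | h
        · exact h1 y h
        · simp at h; simp [h, hx1]
      rw [hsplit, ih a0 (a1 ++ [x]) h0 h1']
      simp [hx1]

-- ===== VERDICT (by name: the statement is the Claim_ definition above) =====
theorem ReversePolishNotation_spec : Claim_equal_ReversePolishNotation := by
  intro s _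
  unfold Spec_ReversePolishNotation
  rw [A_unfold, foldA, B_unfold]
  have hB := foldB (s.toList.map (fun c => String.mk [c])) [] [] (by simp) (by simp)
  simp only [List.nil_append] at hB ⊢
  rw [hB]
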